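-- pv_equiv track=rewrite | github.com/soloist97/Show-And-Tell-Keras | TensorBoardCaption.py | __caption_format
-- ===== SOURCE A (Python) =====
-- def __caption_format(caption, max_length = 7):
--
--     words = caption.split(' ')
--     multiline_words = []
--     for i in range(len(words)):
--         multiline_words.append(words[i])
--         if i!= 0 and i % max_length == 0:
--             multiline_words[-1] = '\n' + multiline_words[-1]
--
--     return ' '.join(multiline_words)
-- ===== SOURCE B (Python) =====
-- def __caption_format(caption, max_length=7):
--     words = caption.split(' ')
--     lines = [' '.join(words[i:i + max_length]) for i in range(0, len(words), max_length)]
--     return ' \n'.join(lines)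
-- ===== Notes on version B (the rewrite author's own statement) =====
-- stated objective: alternative
-- what changed: B replaces A's per-index modulo flagging loop (append each word, prefix a newline when the index is a nonzero multiple of max_length) by chunking the word list in strides of max_length and joining the chunk-joins with a space-plus-newline separator; Pre_ restricts to positive max_length, the function's natural domain: at 0 A raises ZeroDivisionError on multi-word captions, and for negative values A's newline placement is an accident of Python's sign-following modulo that no caller would ask for.
-- outside the precondition, e.g. on __caption_format('hi', 0): A returns 'hi', B raises ValueError; on __caption_format('a b c d e', -2): A returns 'a b \nc d \ne', B returns ''
import Mathlib
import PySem

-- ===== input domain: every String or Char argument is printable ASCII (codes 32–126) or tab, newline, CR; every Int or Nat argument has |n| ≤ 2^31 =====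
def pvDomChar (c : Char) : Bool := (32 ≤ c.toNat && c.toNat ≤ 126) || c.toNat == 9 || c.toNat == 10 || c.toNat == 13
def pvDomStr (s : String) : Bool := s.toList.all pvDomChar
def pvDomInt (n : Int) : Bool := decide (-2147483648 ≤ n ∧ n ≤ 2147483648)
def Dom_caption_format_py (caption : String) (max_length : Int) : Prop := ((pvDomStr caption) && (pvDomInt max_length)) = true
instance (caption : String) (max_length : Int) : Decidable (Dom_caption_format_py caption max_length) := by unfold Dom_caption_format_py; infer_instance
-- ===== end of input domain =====

-- B inserts the newlines by chunking the word list in strides of max_length instead of A's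
-- per-index modulo flag; same output on positive max_length, same cost (objective: alternative decomposition).

-- ===== PORT A =====
def caption_format_py (caption : String) (max_length : Int) : String :=
  -- words = caption.split(' ')   (sep is the non-empty ' ', so split? is always `some`)
  let words := (PySem.Str.split? caption " ").getD []
  -- for i in range(len(words)): append words[i]; then if i != 0 and i % max_length == 0:
  -- multiline_words[-1] = '\n' + multiline_words[-1]  (prefix the word just appended)
  let multiline_words := (PySem.List.pyRange 0 (PySem.List.len words)).foldl
    (fun acc i =>
      if i ≠ 0 ∧ PySem.Int.mod i max_length = 0
      then acc ++ ["\n" ++ PySem.List.pyGetD words i ""]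
      else acc ++ [PySem.List.pyGetD words i ""]) []
  PySem.Str.join " " multiline_words

-- ===== PORT B =====
def caption_format_py_alt (caption : String) (max_length : Int) : String :=
  let words := (PySem.Str.split? caption " ").getD []
  let lines := (PySem.List.pyRange 0 (PySem.List.len words) max_length).map
    (fun i => PySem.Str.join " " (PySem.List.slice words (some i) (some (i + max_length))))
  PySem.Str.join " \n" lines

-- ===== PRECONDITION & SPEC =====
-- Pre_ restricts to positive max_length, the function's natural domain: at max_length = 0 A raises
-- ZeroDivisionError on every multi-word caption (and B's range raises ValueError even on one word),
-- and for negative max_length A's newline placement is an accident of Python's sign-following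
-- modulo that no caller would ask for, while B's chunked range is empty there.
def Pre_caption_format_py (caption : String) (max_length : Int) : Prop := 1 ≤ max_length
instance (caption : String) (max_length : Int) : Decidable (Pre_caption_format_py caption max_length) := by unfold Pre_caption_format_py; infer_instance
def pvWitness_caption_format_py : String × Int := ("a few words to wrap here", 2)

def Spec_caption_format_py (caption : String) (max_length : Int) (out : String) : Prop := out = caption_format_py_alt caption max_length
instance (caption : String) (max_length : Int) (out : String) : Decidable (Spec_caption_format_py caption max_length out) := by unfold Spec_caption_format_py; infer_instance

-- ===== CLAIM (what is proved, stated in full; the proofs are below) =====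
def Claim_equal_caption_format_py : Prop := ∀ (caption : String) (max_length : Int), Dom_caption_format_py caption max_length → Pre_caption_format_py caption max_length → Spec_caption_format_py caption max_length (caption_format_py caption max_length)

-- ===== LEMMAS AND PROOFS =====

-- A-side marking, String level: word at absolute index i gets '\n' when i ≠ 0 and i % m == 0
def msMarkA (m : Int) (i : Int) : List String → List String
  | [] => []
  | w :: t => (if i ≠ 0 ∧ PySem.Int.mod i m = 0 then "\n" ++ w else w) :: msMarkA m (i + 1) t

-- A-side marking, Chars level, divisor k+1, exception at index 0
def pvMarkA (k : Nat) (i : Nat) : List (List Char) → List (List Char)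
  | [] => []
  | w :: t => (if i ≠ 0 ∧ (k + 1) ∣ i then '\n' :: w else w) :: pvMarkA k (i + 1) t

-- marking without the index-0 exception
def pvMarkAll (k : Nat) (i : Nat) : List (List Char) → List (List Char)
  | [] => []
  | w :: t => (if (k + 1) ∣ i then '\n' :: w else w) :: pvMarkAll k (i + 1) t

-- B-side chunks, Chars level
def pvChunks (k : Nat) : List (List Char) → List (List Char)
  | [] => []
  | w :: t => PySem.Chars.join [' '] (List.take (k + 1) (w :: t)) :: pvChunks k (List.drop (k + 1) (w :: t))
termination_by ws => ws.length
decreasing_by simp only [List.length_drop, List.length_cons]; omega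

-- B-side chunks, String level
def msChunks (k : Nat) : List String → List String
  | [] => []
  | w :: t => PySem.Str.join " " (List.take (k + 1) (w :: t)) :: msChunks k (List.drop (k + 1) (w :: t))
termination_by ws => ws.length
decreasing_by simp only [List.length_drop, List.length_cons]; omega

theorem pvChunks_nil (k : Nat) : pvChunks k [] = [] := by rw [pvChunks.eq_def]
theorem pvChunks_cons (k : Nat) (w : List Char) (t : List (List Char)) :
    pvChunks k (w :: t)
      = PySem.Chars.join [' '] (List.take (k + 1) (w :: t)) :: pvChunks k (List.drop (k + 1) (w :: t)) := by
  rw [pvChunks.eq_def]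
theorem msChunks_nil (k : Nat) : msChunks k [] = [] := by rw [msChunks.eq_def]
theorem msChunks_cons (k : Nat) (w : String) (t : List String) :
    msChunks k (w :: t)
      = PySem.Str.join " " (List.take (k + 1) (w :: t)) :: msChunks k (List.drop (k + 1) (w :: t)) := by
  rw [msChunks.eq_def]

theorem markA_append (k : Nat) (xs ys : List (List Char)) : ∀ i,
    pvMarkA k i (xs ++ ys) = pvMarkA k i xs ++ pvMarkA k (i + xs.length) ys := by
  induction xs with
  | nil => intro i; simp [pvMarkA]
  | cons x xs ih =>
      intro i
      simp only [List.cons_append, pvMarkA, List.length_cons, ih (i + 1), List.cons.injEq, true_and]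
      congr 2
      omega

theorem markAll_append (k : Nat) (xs ys : List (List Char)) : ∀ i,
    pvMarkAll k i (xs ++ ys) = pvMarkAll k i xs ++ pvMarkAll k (i + xs.length) ys := by
  induction xs with
  | nil => intro i; simp [pvMarkAll]
  | cons x xs ih =>
      intro i
      simp only [List.cons_append, pvMarkAll, List.length_cons, ih (i + 1), List.cons.injEq, true_and]
      congr 2
      omega

theorem markAll_shift (k : Nat) (xs : List (List Char)) : ∀ i,
    pvMarkAll k (i + (k + 1)) xs = pvMarkAll k i xs := by
  induction xs with
  | nil => intro i; simp [pvMarkAll]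
  | cons x xs ih =>
      intro i
      have hdvd : ((k + 1) ∣ (i + (k + 1))) ↔ ((k + 1) ∣ i) := Nat.dvd_add_self_right
      have harg : i + (k + 1) + 1 = i + 1 + (k + 1) := by ring
      simp only [pvMarkAll, hdvd, harg, ih (i + 1)]

theorem markA_eq_markAll (k : Nat) (xs : List (List Char)) : ∀ i, 1 ≤ i →
    pvMarkA k i xs = pvMarkAll k i xs := by
  induction xs with
  | nil => intro i _; simp [pvMarkA, pvMarkAll]
  | cons x xs ih =>
      intro i hi
      have h0 : i ≠ 0 := by omega
      simp [pvMarkA, pvMarkAll, h0, ih (i + 1) (by omega)]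

theorem markA_id (k : Nat) (xs : List (List Char)) : ∀ i, i + xs.length ≤ k + 1 →
    pvMarkA k i xs = xs := by
  induction xs with
  | nil => intro i _; simp [pvMarkA]
  | cons x xs ih =>
      intro i hi
      simp only [List.length_cons] at hi
      have hcond : ¬ (i ≠ 0 ∧ (k + 1) ∣ i) := by
        rintro ⟨h0, hd⟩
        have := Nat.le_of_dvd (by omega) hd
        omega
      simp [pvMarkA, hcond, ih (i + 1) (by omega)]

theorem markAll_id (k : Nat) (xs : List (List Char)) : ∀ i, 1 ≤ i → i + xs.length ≤ k + 1 →
    pvMarkAll k i xs = xs := by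
  induction xs with
  | nil => intro i _ _; simp [pvMarkAll]
  | cons x xs ih =>
      intro i h1 hi
      simp only [List.length_cons] at hi
      have hcond : ¬ ((k + 1) ∣ i) := by
        intro hd
        have := Nat.le_of_dvd (by omega) hd
        omega
      simp [pvMarkAll, hcond, ih (i + 1) (by omega) (by omega)]

theorem markAll_ne_nil (k i : Nat) (x : List Char) (xs : List (List Char)) :
    pvMarkAll k i (x :: xs) ≠ [] := by simp [pvMarkAll]

theorem join_cons_head (sep : List Char) (a : Char) (p : List Char) (rest : List (List Char)) :
    PySem.Chars.join sep ((a :: p) :: rest) = a :: PySem.Chars.join sep (p :: rest) := by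
  cases rest with
  | nil => simp [PySem.Chars.join_singleton]
  | cons q rs => simp [PySem.Chars.join_cons_cons]

theorem join_append (sep : List Char) (xs ys : List (List Char)) (hx : xs ≠ []) (hy : ys ≠ []) :
    PySem.Chars.join sep (xs ++ ys) = PySem.Chars.join sep xs ++ sep ++ PySem.Chars.join sep ys := by
  induction xs with
  | nil => simp at hx
  | cons x xs ih =>
      cases xs with
      | nil =>
          cases ys with
          | nil => simp at hy
          | cons y ys => simp [PySem.Chars.join_cons_cons, PySem.Chars.join_singleton]
      | cons x' xs' =>
          have hih := ih (by simp)
          simp only [List.cons_append] at hih ⊢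
          rw [PySem.Chars.join_cons_cons, PySem.Chars.join_cons_cons, hih]
          simp [List.append_assoc]

-- part 1 of the key identity: marking every multiple of k+1 (index 0 included)
theorem joinMarkAll (k : Nat) (ws : List (List Char)) (h : ws ≠ []) :
    PySem.Chars.join [' '] (pvMarkAll k 0 ws) =
      '\n' :: PySem.Chars.join [' ', '\n'] (pvChunks k ws) := by
  match ws with
  | [] => simp at h
  | w :: t =>
      have htake : List.take (k + 1) (w :: t) = w :: List.take k t := List.take_succ_cons
      have hdropc : List.drop (k + 1) (w :: t) = List.drop k t := List.drop_succ_cons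
      have hmark0 : pvMarkAll k 0 (w :: t) = ('\n' :: w) :: pvMarkAll k 1 t := by
        simp [pvMarkAll]
      have hsplit : pvMarkAll k 1 t
          = List.take k t ++ pvMarkAll k (1 + (List.take k t).length) (List.drop k t) := by
        conv_lhs => rw [← List.take_append_drop k t]
        rw [markAll_append]
        congr 1
        exact markAll_id k _ 1 le_rfl (by simp only [List.length_take]; omega)
      by_cases hr : List.drop k t = []
      · rw [hmark0, hsplit, hr]
        simp only [pvMarkAll, List.append_nil]
        rw [join_cons_head]
        rw [pvChunks_cons, htake, hdropc, hr, pvChunks_nil]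
        rw [PySem.Chars.join_singleton]
      · have hklen : k < t.length := by
          by_contra hh
          exact hr (List.drop_eq_nil_of_le (by omega))
        have hlen_take : (List.take k t).length = k := by
          simp only [List.length_take]; omega
        rw [hmark0, hsplit, hlen_take]
        rw [show 1 + k = 0 + (k + 1) by ring, markAll_shift]
        obtain ⟨r0, rt, hr'⟩ := List.exists_cons_of_ne_nil hr
        have hmm : pvMarkAll k 0 (List.drop k t) ≠ [] := by
          rw [hr']; exact markAll_ne_nil k 0 r0 rt
        rw [show ('\n' :: w) :: (List.take k t ++ pvMarkAll k 0 (List.drop k t))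
              = (('\n' :: w) :: List.take k t) ++ pvMarkAll k 0 (List.drop k t) from rfl]
        rw [join_append _ _ _ (by simp) hmm]
        rw [join_cons_head]
        rw [joinMarkAll k (List.drop k t) hr]
        rw [pvChunks_cons, htake, hdropc, hr', pvChunks_cons]
        rw [PySem.Chars.join_cons_cons]
        simp [List.append_assoc]
termination_by ws.length
decreasing_by simp only [List.length_drop, List.length_cons]; omega

-- part 2: A's marking (index 0 exempt) joined with ' ' is B's chunk list joined with ' \n'
theorem joinMarkA (k : Nat) (ws : List (List Char)) :
    PySem.Chars.join [' '] (pvMarkA k 0 ws) =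
      PySem.Chars.join [' ', '\n'] (pvChunks k ws) := by
  match ws with
  | [] => simp [pvMarkA, pvChunks_nil]
  | w :: t =>
      have htake : List.take (k + 1) (w :: t) = w :: List.take k t := List.take_succ_cons
      have hdropc : List.drop (k + 1) (w :: t) = List.drop k t := List.drop_succ_cons
      have hmark0 : pvMarkA k 0 (w :: t) = w :: pvMarkA k 1 t := by
        simp [pvMarkA]
      have hsplit : pvMarkA k 1 t
          = List.take k t ++ pvMarkA k (1 + (List.take k t).length) (List.drop k t) := by
        conv_lhs => rw [← List.take_append_drop k t]
        rw [markA_append]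
        congr 1
        exact markA_id k _ 1 (by simp only [List.length_take]; omega)
      by_cases hr : List.drop k t = []
      · rw [hmark0, hsplit, hr]
        simp only [pvMarkA, List.append_nil]
        rw [pvChunks_cons, htake, hdropc, hr, pvChunks_nil]
        rw [PySem.Chars.join_singleton]
      · have hklen : k < t.length := by
          by_contra hh
          exact hr (List.drop_eq_nil_of_le (by omega))
        have hlen_take : (List.take k t).length = k := by
          simp only [List.length_take]; omega
        rw [hmark0, hsplit, hlen_take]
        rw [markA_eq_markAll k _ (1 + k) (by omega)]
        rw [show 1 + k = 0 + (k + 1) by ring, markAll_shift]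
        obtain ⟨r0, rt, hr'⟩ := List.exists_cons_of_ne_nil hr
        have hmm : pvMarkAll k 0 (List.drop k t) ≠ [] := by
          rw [hr']; exact markAll_ne_nil k 0 r0 rt
        rw [show w :: (List.take k t ++ pvMarkAll k 0 (List.drop k t))
              = (w :: List.take k t) ++ pvMarkAll k 0 (List.drop k t) from rfl]
        rw [join_append _ _ _ (by simp) hmm]
        rw [joinMarkAll k (List.drop k t) hr]
        rw [pvChunks_cons, htake, hdropc, hr', pvChunks_cons]
        rw [PySem.Chars.join_cons_cons]
        simp [List.append_assoc]

-- ---- bridges between the ports and the Chars-level identity ----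

theorem foldl_enumerate_markA (m : Int) (ws : List String) : ∀ (init : List String) (s : Int),
    List.foldl (fun acc (p : Int × String) =>
        if p.1 ≠ 0 ∧ PySem.Int.mod p.1 m = 0 then acc ++ ["\n" ++ p.2] else acc ++ [p.2])
      init (PySem.List.enumerate ws s) = init ++ msMarkA m s ws := by
  induction ws with
  | nil => intro init s; simp [PySem.List.enumerate_nil, msMarkA]
  | cons w t ih =>
      intro init s
      rw [PySem.List.enumerate_cons]
      simp only [List.foldl_cons]
      by_cases hc : s ≠ 0 ∧ PySem.Int.mod s m = 0
      · simp only [hc, if_pos, msMarkA, ih]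
        simp [hc]
      · simp only [hc, msMarkA, ih]
        simp [hc]

theorem msMarkA_toList (m : Int) (hm : m ≠ 0) (k : Nat) (hk : k + 1 = m.natAbs)
    (ws : List String) : ∀ (j : Nat),
    (msMarkA m (j : Int) ws).map String.toList = pvMarkA k j (ws.map String.toList) := by
  induction ws with
  | nil => intro j; simp [msMarkA, pvMarkA]
  | cons w t ih =>
      intro j
      have hcond : ((j : Int) ≠ 0 ∧ PySem.Int.mod (j : Int) m = 0) ↔ (j ≠ 0 ∧ (k + 1) ∣ j) := by
        rw [PySem.Int.mod_eq_zero_iff_dvd]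
        constructor
        · rintro ⟨h0, hd⟩
          refine ⟨by exact_mod_cast h0, ?_⟩
          have h2 : (m.natAbs : Int) ∣ (j : Int) := (Int.natAbs_dvd).mpr hd
          rw [← hk] at h2
          exact_mod_cast h2
        · rintro ⟨h0, hd⟩
          refine ⟨by exact_mod_cast h0, ?_⟩
          apply (Int.natAbs_dvd).mp
          rw [← hk]
          exact_mod_cast hd
      have hcast : (j : Int) + 1 = ((j + 1 : Nat) : Int) := by push_cast; ring
      by_cases hc : j ≠ 0 ∧ (k + 1) ∣ j
      · have hc' := hcond.mpr hc
        simp only [msMarkA, pvMarkA, List.map_cons, if_pos hc, if_pos hc']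
        rw [hcast, ih (j + 1)]
        simp [String.toList_append]
      · have hc' : ¬ ((j : Int) ≠ 0 ∧ PySem.Int.mod (j : Int) m = 0) := fun h => hc (hcond.mp h)
        simp only [msMarkA, pvMarkA, List.map_cons, if_neg hc, if_neg hc']
        rw [hcast, ih (j + 1)]

-- pyRange with a positive step: nil / cons / shift
theorem pyRange_pos_nil (a b s : Int) (hs : 0 < s) (hab : b ≤ a) :
    PySem.List.pyRange a b s = [] := by
  rw [PySem.List.pyRange_of_pos a b hs]
  simp [show ¬ a < b by omega]

theorem pyRange_pos_cons (a b s : Int) (hs : 0 < s) (hab : a < b) :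
    PySem.List.pyRange a b s = a :: PySem.List.pyRange (a + s) b s := by
  rw [PySem.List.pyRange_of_pos a b hs, PySem.List.pyRange_of_pos (a + s) b hs]
  rw [if_pos hab]
  have hs0 : s ≠ 0 := by omega
  have hrw : (b - a + s - 1) / s = (b - a - 1) / s + 1 := by
    have h := Int.add_mul_ediv_right (b - a - 1) 1 hs0
    have harg : b - a + s - 1 = b - a - 1 + 1 * s := by ring
    rw [harg, h]
  have h1 : 0 ≤ (b - a - 1) / s := Int.ediv_nonneg (by omega) (by omega)
  by_cases h2 : a + s < b
  · rw [if_pos h2]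
    have hn : ((b - a + s - 1) / s).toNat = ((b - (a + s) + s - 1) / s).toNat + 1 := by
      have harg : b - (a + s) + s - 1 = b - a - 1 := by ring
      rw [harg, hrw]
      omega
    rw [hn, List.range_succ_eq_map, List.map_cons, List.map_map]
    congr 1
    · ring
    · apply List.map_congr_left
      intro x _
      simp only [Function.comp_apply, Nat.succ_eq_add_one]
      push_cast
      ring
  · rw [if_neg h2]
    have hq : (b - a + s - 1) / s = 1 := by
      have hle : 1 ≤ (b - a + s - 1) / s := (Int.le_ediv_iff_mul_le hs).mpr (by omega)
      have hlt : (b - a + s - 1) / s < 2 := (Int.ediv_lt_iff_lt_mul hs).mpr (by omega)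
      omega
    rw [hq]
    simp

theorem pyRange_pos_shift (a b s : Int) (hs : 0 < s) :
    PySem.List.pyRange a b s = (PySem.List.pyRange 0 (b - a) s).map (fun x => a + x) := by
  rw [PySem.List.pyRange_of_pos a b hs, PySem.List.pyRange_of_pos 0 (b - a) hs]
  by_cases h : a < b
  · rw [if_pos h, if_pos (by omega)]
    rw [List.map_map]
    have harg : b - a - 0 = b - a := by ring
    rw [harg]
    apply List.map_congr_left
    intro x _
    simp only [Function.comp_apply]
    ring
  · rw [if_neg h, if_neg (by omega)]
    simp

-- B's map over the stepped range is exactly the chunk list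
theorem map_range_chunks (k : Nat) (ws : List String) :
    (PySem.List.pyRange 0 (PySem.List.len ws) ((k + 1 : Nat) : Int)).map
        (fun i => PySem.Str.join " " (PySem.List.slice ws (some i) (some (i + ((k + 1 : Nat) : Int)))))
      = msChunks k ws := by
  have hs : (0 : Int) < ((k + 1 : Nat) : Int) := by exact_mod_cast Nat.succ_pos k
  match ws with
  | [] =>
      rw [PySem.List.len_eq]
      rw [show (([] : List String).length : Int) = 0 by simp]
      rw [pyRange_pos_nil 0 0 _ hs le_rfl]
      simp [msChunks_nil]
  | w :: t =>
      rw [PySem.List.len_eq]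
      have hL : (0 : Int) < (((w :: t).length : Nat) : Int) := by
        simp only [List.length_cons]; exact_mod_cast Nat.succ_pos t.length
      rw [pyRange_pos_cons 0 _ _ hs hL, List.map_cons]
      have hhead : PySem.Str.join " " (PySem.List.slice (w :: t) (some 0) (some (0 + ((k + 1 : Nat) : Int))))
          = PySem.Str.join " " (List.take (k + 1) (w :: t)) := by
        congr 1
        rw [PySem.List.slice_toNat _ le_rfl (by omega)]
        simp
      rw [hhead]
      rw [zero_add]
      by_cases hdrop : (w :: t).length ≤ k + 1
      · rw [pyRange_pos_nil _ _ _ hs (by exact_mod_cast hdrop)]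
        rw [msChunks_cons, List.drop_eq_nil_of_le hdrop, msChunks_nil]
        simp
      · rw [pyRange_pos_shift _ _ _ hs, List.map_map]
        have hcongr : ∀ x ∈ PySem.List.pyRange 0 ((((w :: t).length : Nat) : Int) - ((k + 1 : Nat) : Int)) ((k + 1 : Nat) : Int),
            PySem.Str.join " " (PySem.List.slice (w :: t) (some (((k + 1 : Nat) : Int) + x)) (some ((((k + 1 : Nat) : Int) + x) + ((k + 1 : Nat) : Int))))
              = PySem.Str.join " " (PySem.List.slice (List.drop (k + 1) (w :: t)) (some x) (some (x + ((k + 1 : Nat) : Int)))) := by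
          intro x hx
          obtain ⟨hx0, -, -⟩ := (PySem.List.mem_pyRange_iff_of_pos hs x).mp hx
          congr 1
          rw [PySem.List.slice_toNat _ (by omega) (by omega),
              PySem.List.slice_toNat _ (by omega) (by omega)]
          rw [List.drop_drop]
          have e1 : (((k + 1 : Nat) : Int) + x).toNat = (k + 1) + x.toNat := by omega
          rw [e1]
          rw [show ((((k + 1 : Nat) : Int) + x) + ((k + 1 : Nat) : Int)).toNat - ((k + 1) + x.toNat)
              = (x + ((k + 1 : Nat) : Int)).toNat - x.toNat by omega]
        have hmap := List.map_congr_left hcongr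
        simp only [Function.comp_def] at hmap ⊢
        rw [hmap]
        have hlen2 : (((w :: t).length : Nat) : Int) - ((k + 1 : Nat) : Int)
            = PySem.List.len (List.drop (k + 1) (w :: t)) := by
          rw [PySem.List.len_eq, List.length_drop]
          push_cast
          omega
        rw [hlen2, map_range_chunks k (List.drop (k + 1) (w :: t))]
        rw [msChunks_cons]
termination_by ws.length
decreasing_by simp only [List.length_drop, List.length_cons]; omega

theorem msChunks_toList (k : Nat) (ws : List String) :
    (msChunks k ws).map String.toList = pvChunks k (ws.map String.toList) := by
  match ws with
  | [] => simp [msChunks_nil, pvChunks_nil]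
  | w :: t =>
      rw [msChunks_cons, List.map_cons, List.map_cons, pvChunks_cons]
      congr 1
      · rw [PySem.Str.toList_join, List.map_take]
        rfl
      · rw [msChunks_toList k (List.drop (k + 1) (w :: t)), List.map_drop]
        rfl
termination_by ws.length
decreasing_by simp only [List.length_drop, List.length_cons]; omega

-- ===== VERDICT (by name: the statement is the Claim_ definition above) =====
theorem caption_format_py_spec : Claim_equal_caption_format_py := by
  intro caption m _ hpre
  have hm1 : 1 ≤ m := hpre
  have hm : m ≠ 0 := by omega
  unfold Spec_caption_format_py caption_format_py caption_format_py_alt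
  simp only []
  generalize (PySem.Str.split? caption " ").getD [] = words
  set k := m.toNat - 1 with hkdef
  have hk : (k + 1) = m.natAbs := by omega
  refine String.toList_inj.mp ?_
  have hA : (PySem.List.pyRange 0 (PySem.List.len words)).foldl
      (fun acc i =>
        if i ≠ 0 ∧ PySem.Int.mod i m = 0
        then acc ++ ["\n" ++ PySem.List.pyGetD words i ""]
        else acc ++ [PySem.List.pyGetD words i ""]) []
      = msMarkA m 0 words := by
    have h := foldl_enumerate_markA m words [] 0
    rw [PySem.List.enumerate_eq_map_pyRange words "", List.foldl_map] at h
    simpa using h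
  have hstep : m = ((k + 1 : Nat) : Int) := by omega
  rw [hA, hstep, map_range_chunks k words]
  rw [PySem.Str.toList_join, PySem.Str.toList_join]
  have h0 : ((0 : Nat) : Int) = (0 : Int) := by norm_num
  have hmark := msMarkA_toList m hm k hk words 0
  rw [h0] at hmark
  rw [← hstep, hmark, msChunks_toList k words]
  exact joinMarkA k (words.map String.toList)
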